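-- pv_equiv track=rewrite | github.com/alphanumericnonsense/code-samples | python-examples/dilithium-python/dilithium.py | MatVecMult
-- ===== SOURCE A (Python) =====
-- QQ = 8380417
--
-- def RqZero():
--     """
--     return zero poly
--     """
--     return [0 for i1 in range(256)]
--
-- def PWMult(ahat,bhat):
--     """
--     multiplication in NTT domain
--     """
--     return [(ahat[i]*bhat[i]) % QQ for i in range(256)]
--
-- def RqAdd(a,b):
--     c = []
--     for i in range(256):
--         c.append((a[i] + b[i]) % QQ)
--     return c
--
-- def MatVecMult(Ahat, vhat, k, l):
--     """
--     kxl matrix times length l vector, poly entries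
--     IN NTT DOMAIN!!!
--     """
--     what = []
--     for i in range(k):
--         s = RqZero()
--         for j in range(l):
--             s = RqAdd(s, PWMult(Ahat[i][j], vhat[j]))
--         what.append(s)
--     return what
-- ===== SOURCE B (Python) =====
-- QQ = 8380417
--
-- def MatVecMult(Ahat, vhat, k, l):
--     """
--     kxl matrix times length l vector, poly entries
--     IN NTT DOMAIN!!!
--     """
--     what = []
--     for i in range(k):
--         prods = [[Ahat[i][j][c] * vhat[j][c] for c in range(256)] for j in range(l)]
--         what.append([s % QQ for s in map(sum, zip(*prods))] if prods else [0] * 256)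
--     return what
-- ===== Notes on version B (the rewrite author's own statement) =====
-- stated objective: alternative
-- what changed: Replaces A's running accumulator polynomial (RqZero then repeated full-poly RqAdd/PWMult passes with a modulo at every step) by a staged transpose computation: per row it first materializes all l product polynomials, then column-sums them via zip(*prods)/map(sum) with a single final % QQ per coefficient; the empty sum (l<=0) is the zero polynomial directly.
import Mathlib
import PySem

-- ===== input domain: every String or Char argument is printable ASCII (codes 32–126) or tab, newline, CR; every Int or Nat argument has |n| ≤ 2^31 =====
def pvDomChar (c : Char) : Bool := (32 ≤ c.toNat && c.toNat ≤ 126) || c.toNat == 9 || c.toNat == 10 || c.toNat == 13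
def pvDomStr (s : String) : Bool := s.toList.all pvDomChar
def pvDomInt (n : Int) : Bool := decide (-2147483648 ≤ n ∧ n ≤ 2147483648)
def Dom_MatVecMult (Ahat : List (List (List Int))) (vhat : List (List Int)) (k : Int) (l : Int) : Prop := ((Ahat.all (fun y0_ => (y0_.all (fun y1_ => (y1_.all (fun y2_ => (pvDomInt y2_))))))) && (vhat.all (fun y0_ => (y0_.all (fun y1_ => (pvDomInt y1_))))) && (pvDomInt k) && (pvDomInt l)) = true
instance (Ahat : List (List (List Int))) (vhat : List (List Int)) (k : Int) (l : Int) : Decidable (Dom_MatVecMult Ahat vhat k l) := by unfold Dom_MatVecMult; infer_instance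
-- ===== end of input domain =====

-- B replaces the running-accumulator pipeline by a staged transpose per row: materialize the
-- l product polynomials, zip-transpose and column-sum with a single final % QQ (alternative).

-- ===== PORT A =====
def pvQQ : Int := 8380417

def pvRqZero : List Int := (PySem.List.pyRange 0 256 1).map (fun _ => (0 : Int))

def pvPWMult (ahat bhat : List Int) : List Int :=
  (PySem.List.pyRange 0 256 1).map
    (fun i => PySem.Int.mod (PySem.List.pyGetD ahat i 0 * PySem.List.pyGetD bhat i 0) pvQQ)

def pvRqAdd (a b : List Int) : List Int :=
  (PySem.List.pyRange 0 256 1).foldl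
    (fun c i => c ++ [PySem.Int.mod (PySem.List.pyGetD a i 0 + PySem.List.pyGetD b i 0) pvQQ]) []

def MatVecMult (Ahat : List (List (List Int))) (vhat : List (List Int)) (k : Int) (l : Int) : List (List Int) :=
  (PySem.List.pyRange 0 k 1).foldl
    (fun what i =>
      what ++ [(PySem.List.pyRange 0 l 1).foldl
        (fun s j => pvRqAdd s (pvPWMult (PySem.List.pyGetD (PySem.List.pyGetD Ahat i []) j [])
                                        (PySem.List.pyGetD vhat j [])))
        pvRqZero]) []

-- ===== PORT B =====
-- hand port of Python's zip(*rows): take heads while every row is nonempty (exact: zip stops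
-- at the shortest row, which is bounded by the first row's length; zip(*[]) is empty)
def pvZipStarAux : Nat -> List (List Int) -> List (List Int)
  | 0, _ => []
  | Nat.succ n, rows =>
    if rows ≠ [] ∧ rows.all (fun r => !r.isEmpty) then
      (rows.map (fun r => r.headD 0)) :: pvZipStarAux n (rows.map (fun r => r.tail))
    else []

def pvZipStar (rows : List (List Int)) : List (List Int) :=
  pvZipStarAux (rows.headD []).length rows

def MatVecMult_alt (Ahat : List (List (List Int))) (vhat : List (List Int)) (k : Int) (l : Int) : List (List Int) :=
  (PySem.List.pyRange 0 k 1).foldl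
    (fun what i =>
      let prods := (PySem.List.pyRange 0 l 1).map (fun j =>
        (PySem.List.pyRange 0 256 1).map (fun c =>
          PySem.List.pyGetD (PySem.List.pyGetD (PySem.List.pyGetD Ahat i []) j []) c 0 *
          PySem.List.pyGetD (PySem.List.pyGetD vhat j []) c 0));
      what ++ [if prods ≠ [] then
                 (pvZipStar prods).map (fun col => PySem.Int.mod (col.foldl (· + ·) 0) pvQQ)
               else List.replicate 256 0]) []

-- ===== PRECONDITION & SPEC =====
-- Pre_ excludes exactly the inputs on which Python A raises IndexError: a row/poly index
-- reached by the loops that is out of range, or an accessed polynomial shorter than 256.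
def Pre_MatVecMult (Ahat : List (List (List Int))) (vhat : List (List Int)) (k : Int) (l : Int) : Prop :=
  0 < k → 0 < l → k.toNat ≤ Ahat.length ∧ l.toNat ≤ vhat.length ∧
    (∀ v ∈ vhat.take l.toNat, 256 ≤ v.length) ∧
    ∀ row ∈ Ahat.take k.toNat, l.toNat ≤ row.length ∧ ∀ p ∈ row.take l.toNat, 256 ≤ p.length
instance (Ahat : List (List (List Int))) (vhat : List (List Int)) (k : Int) (l : Int) : Decidable (Pre_MatVecMult Ahat vhat k l) := by unfold Pre_MatVecMult; infer_instance

def pvWitness_MatVecMult : List (List (List Int)) × List (List Int) × Int × Int := ([], [], 0, 0)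

def Spec_MatVecMult (Ahat : List (List (List Int))) (vhat : List (List Int)) (k : Int) (l : Int) (out : List (List Int)) : Prop := out = MatVecMult_alt Ahat vhat k l
instance (Ahat : List (List (List Int))) (vhat : List (List Int)) (k : Int) (l : Int) (out : List (List Int)) : Decidable (Spec_MatVecMult Ahat vhat k l out) := by unfold Spec_MatVecMult; infer_instance

-- ===== CLAIM (what is proved, stated in full; the proofs are below) =====
def Claim_equal_MatVecMult : Prop := ∀ (Ahat : List (List (List Int))) (vhat : List (List Int)) (k : Int) (l : Int), Dom_MatVecMult Ahat vhat k l → Pre_MatVecMult Ahat vhat k l → Spec_MatVecMult Ahat vhat k l (MatVecMult Ahat vhat k l)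

-- ===== LEMMAS AND PROOFS =====

lemma pvQQ_pos : (0 : Int) < pvQQ := by norm_num [pvQQ]

lemma pvmod_add (a b : Int) :
    PySem.Int.mod (PySem.Int.mod a pvQQ + PySem.Int.mod b pvQQ) pvQQ = PySem.Int.mod (a + b) pvQQ := by
  simp only [PySem.Int.mod_eq_emod_of_pos pvQQ_pos]
  exact (Int.add_emod a b pvQQ).symm

lemma pvRqAdd_eq (a b : List Int) :
    pvRqAdd a b = (PySem.List.pyRange 0 256 1).map
      (fun i => PySem.Int.mod (PySem.List.pyGetD a i 0 + PySem.List.pyGetD b i 0) pvQQ) := by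
  unfold pvRqAdd
  rw [PySem.List.foldl_append_singleton_eq_map, List.nil_append]

-- pointwise sum-accumulation invariant for the inner loop of A
lemma pv_inner (P : Int → Int → Int) : ∀ (js : List Int) (S : Int → Int),
    js.foldl
      (fun s j => pvRqAdd s ((PySem.List.pyRange 0 256 1).map
        (fun c => PySem.Int.mod (P j c) pvQQ)))
      ((PySem.List.pyRange 0 256 1).map (fun c => PySem.Int.mod (S c) pvQQ))
    = (PySem.List.pyRange 0 256 1).map
        (fun c => PySem.Int.mod (js.foldl (fun acc j => acc + P j c) (S c)) pvQQ) := by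
  intro js
  induction js with
  | nil => intro S; simp
  | cons j js ih =>
    intro S
    have hstep : pvRqAdd ((PySem.List.pyRange 0 256 1).map (fun c => PySem.Int.mod (S c) pvQQ))
        ((PySem.List.pyRange 0 256 1).map (fun c => PySem.Int.mod (P j c) pvQQ))
        = (PySem.List.pyRange 0 256 1).map (fun c => PySem.Int.mod (S c + P j c) pvQQ) := by
      rw [pvRqAdd_eq]
      refine List.map_congr_left ?_
      intro c hc
      have hb := (PySem.List.mem_pyRange_one).1 hc
      rw [PySem.List.pyGetD_map_pyRange_of_nonneg _ _ _ _ hb.1 hb.2,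
          PySem.List.pyGetD_map_pyRange_of_nonneg _ _ _ _ hb.1 hb.2]
      exact pvmod_add (S c) (P j c)
    simp only [List.foldl_cons, hstep]
    exact ih (fun c => S c + P j c)

lemma pvRqZero_eq : pvRqZero
    = (PySem.List.pyRange 0 256 1).map (fun c => PySem.Int.mod ((fun _ => (0 : Int)) c) pvQQ) := by
  unfold pvRqZero
  refine List.map_congr_left ?_
  intro c _
  simp [PySem.Int.mod_eq_emod_of_pos pvQQ_pos]

-- zip(*rows) of a rectangular family of rows is the coefficient-major transpose
lemma pvZipStarAux_maps (js : List Int) (hjs : js ≠ []) (Q : Int → Int → Int) :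
    ∀ cs : List Int,
      pvZipStarAux cs.length (js.map (fun j => cs.map (Q j)))
        = cs.map (fun c => js.map (fun j => Q j c)) := by
  intro cs
  induction cs with
  | nil => simp [pvZipStarAux]
  | cons c cs ih =>
    simp only [List.length_cons, pvZipStarAux]
    rw [if_pos (by constructor <;> simp [hjs])]
    simp only [List.map_map, Function.comp_def, List.headD_cons, List.tail_cons, List.map_cons]
    rw [ih]

lemma pvZipStar_maps (js : List Int) (hjs : js ≠ []) (Q : Int → Int → Int) (cs : List Int) :
    pvZipStar (js.map (fun j => cs.map (Q j))) = cs.map (fun c => js.map (fun j => Q j c)) := by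
  unfold pvZipStar
  cases js with
  | nil => exact absurd rfl hjs
  | cons j js' =>
    simp only [List.map_cons, List.headD_cons, List.length_map]
    exact pvZipStarAux_maps (j :: js') hjs Q cs

-- ===== VERDICT (by name: the statement is the Claim_ definition above) =====
theorem MatVecMult_spec : Claim_equal_MatVecMult := by
  intro Ahat vhat k l _ _
  unfold Spec_MatVecMult MatVecMult MatVecMult_alt pvPWMult
  rw [PySem.List.foldl_append_singleton_eq_map, PySem.List.foldl_append_singleton_eq_map,
      List.nil_append, List.nil_append]
  refine List.map_congr_left ?_
  intro i _
  rw [pvRqZero_eq,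
      pv_inner (fun j c =>
        PySem.List.pyGetD (PySem.List.pyGetD (PySem.List.pyGetD Ahat i []) j []) c 0 *
        PySem.List.pyGetD (PySem.List.pyGetD vhat j []) c 0)
      (PySem.List.pyRange 0 l 1) (fun _ => 0)]
  by_cases hjs : (PySem.List.pyRange 0 l 1 : List Int) = []
  · -- empty sum: A's row is 256 zeros; B's row is the literal zero polynomial
    simp only [hjs, List.map_nil, List.foldl_nil]
    rw [if_neg (by simp)]
    have : ((PySem.List.pyRange 0 256 1).map
        (fun _ => PySem.Int.mod (0 : Int) pvQQ)) = List.replicate 256 (0 : Int) := by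
      rw [List.map_const', PySem.List.length_pyRange_one]
      simp [PySem.Int.mod_eq_emod_of_pos pvQQ_pos]
    exact this
  · rw [if_pos (by simp [hjs]),
        pvZipStar_maps (PySem.List.pyRange 0 l 1) hjs
          (fun j c =>
            PySem.List.pyGetD (PySem.List.pyGetD (PySem.List.pyGetD Ahat i []) j []) c 0 *
            PySem.List.pyGetD (PySem.List.pyGetD vhat j []) c 0)
          (PySem.List.pyRange 0 256 1),
        List.map_map]
    refine List.map_congr_left ?_
    intro c _
    simp only [Function.comp]
    rw [List.foldl_map]
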